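-- pv_equiv track=rewrite | github.com/oashtari/cs-module-project-algorithms | eating_cookies/eating_cookies.py | find_smallest_missing
-- ===== SOURCE A (Python) =====
-- def find_smallest_missing(arr):
--     # if arr is not sorted, can run arr.sort(), but that has a O(n log n) which is expensive
--     if arr[0] !=0:
--         return 0
--
--     # add another check if arr[-1] == len(arr) -1, checks to see if nothing is missing
--     if arr[-1] == len(arr) - 1:
--         return len(arr)
--
--     start = 0
--     end = len(arr) - 1
--
--     while start < end:
--         mid = (start + end) // 2
--
--         if arr[mid] == mid:
--             # toss out left side
--             # don't include midpoint as it matches its index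
--             start = mid + 1
--
--         else:
--             # toss out the right side, but do keep the midpoint
--             # since cannot rule out that is the smallest missing
--             end = mid
--
--     # we've narroed it down to one element
--     # at this point start == end, so return either
--     return end
--
--     # O(n) traverals through entire array
--     # realizing that we're not taking advantage of fact that input is sorted,
--     # we can ask ourselves how to leverage that fact ()
--     for i in range(len(arr) - 1):
--         if arr[i+1] != arr[i] + 1:
--             return arr[i] + 1
--
--     return arr[-1] + 1
-- ===== SOURCE B (Python) =====
-- def find_smallest_missing(arr):
--     if arr[0] != 0:
--         return 0
--     if arr[-1] == len(arr) - 1: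
--         return len(arr)
--
--     def go(s, length):
--         # interval represented by its start and its LENGTH instead of (start, end)
--         if length == 0:
--             return s
--         half = length // 2
--         m = s + half
--         if arr[m] == m:
--             return go(m + 1, length - half - 1)
--         return go(s, half)
--
--     return go(0, len(arr) - 1)
-- ===== Notes on version B (the rewrite author's own statement) =====
-- stated objective: alternative
-- what changed: A's imperative while-loop binary search over a mutable (start, end) pair becomes a recursive helper over (start, length) — the interval is carried as its start and its length, with half = length//2 — and A's dead linear-scan code after the return is dropped.
import Mathlib
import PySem

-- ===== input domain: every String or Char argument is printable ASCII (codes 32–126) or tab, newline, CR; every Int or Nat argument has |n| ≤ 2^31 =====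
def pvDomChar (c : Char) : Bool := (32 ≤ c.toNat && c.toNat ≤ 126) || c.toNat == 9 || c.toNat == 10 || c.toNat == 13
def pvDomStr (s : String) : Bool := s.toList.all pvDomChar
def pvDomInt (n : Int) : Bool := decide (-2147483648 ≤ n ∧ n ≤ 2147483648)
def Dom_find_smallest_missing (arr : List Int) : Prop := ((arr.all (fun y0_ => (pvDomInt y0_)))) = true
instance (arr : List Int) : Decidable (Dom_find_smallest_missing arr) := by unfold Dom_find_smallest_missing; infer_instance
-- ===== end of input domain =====

-- B replaces A's (start, end) while-loop binary search by a recursive helper on the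
-- interval's start and LENGTH (and drops A's dead code). Objective: alternative.

-- ===== PORT A =====
-- A's while loop: mutable (start, end), narrowed while start < end.
-- arr[mid] is always in range on the port's own calls; `.getD 0` only totalises the definition.
def find_smallest_missing_loop (arr : List Int) (start stop : Int) : Int :=
  if h : start < stop then
    let mid := PySem.Int.floordiv (start + stop) 2
    if (PySem.List.pyGet? arr mid).getD 0 = mid then
      find_smallest_missing_loop arr (mid + 1) stop
    else
      find_smallest_missing_loop arr start mid
  else
    stop
termination_by (stop - start).toNat
decreasing_by
  · have := PySem.Int.floordiv_two_mid_bounds (le_of_lt h)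
    omega
  · have h2 : PySem.Int.floordiv (start + stop) 2 < stop := by
      exact (PySem.Int.floordiv_lt_iff_lt_mul (a := start + stop) (b := 2) (q := stop) (by omega)).mpr (by omega)
    have := PySem.Int.floordiv_two_mid_bounds (le_of_lt h)
    omega

def find_smallest_missing (arr : List Int) : Int :=
  match PySem.List.pyGet? arr 0 with
  | none => 0  -- IndexError in Python: excluded by Pre_find_smallest_missing
  | some a0 =>
    if a0 ≠ 0 then 0
    else if (PySem.List.pyGet? arr (-1)).getD 0 = (arr.length : Int) - 1 then (arr.length : Int)
    else find_smallest_missing_loop arr 0 ((arr.length : Int) - 1)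

-- ===== PORT B =====
-- B's helper go(s, length): the interval is its start plus its length (a Nat).
def fsm_go (arr : List Int) (s : Int) (len : Nat) : Int :=
  if len = 0 then s
  else
    let half := len / 2
    let m : Int := s + half
    if (PySem.List.pyGet? arr m).getD 0 = m then
      fsm_go arr (m + 1) (len - half - 1)
    else
      fsm_go arr s half
termination_by len
decreasing_by all_goals omega

def find_smallest_missing_alt (arr : List Int) : Int :=
  match PySem.List.pyGet? arr 0 with
  | none => 0  -- IndexError in Python: excluded by Pre_find_smallest_missing
  | some a0 =>
    if a0 ≠ 0 then 0
    else if (PySem.List.pyGet? arr (-1)).getD 0 = (arr.length : Int) - 1 then (arr.length : Int)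
    else fsm_go arr 0 (arr.length - 1)

-- ===== PRECONDITION & SPEC =====
-- Pre_ excludes only the empty list, on which A (and B) raise IndexError at the first-element access.
def Pre_find_smallest_missing (arr : List Int) : Prop := arr ≠ []
instance (arr : List Int) : Decidable (Pre_find_smallest_missing arr) := by
  unfold Pre_find_smallest_missing; infer_instance

def pvWitness_find_smallest_missing : List Int := [0, 1, 3]

def Spec_find_smallest_missing (arr : List Int) (out : Int) : Prop := out = find_smallest_missing_alt arr
instance (arr : List Int) (out : Int) : Decidable (Spec_find_smallest_missing arr out) := by unfold Spec_find_smallest_missing; infer_instance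

-- ===== CLAIM (what is proved, stated in full; the proofs are below) =====
def Claim_equal_find_smallest_missing : Prop := ∀ (arr : List Int), Dom_find_smallest_missing arr → Pre_find_smallest_missing arr → Spec_find_smallest_missing arr (find_smallest_missing arr)

-- ===== LEMMAS AND PROOFS =====

-- A's midpoint (start+stop)//2 is start plus half the interval length.
theorem mid_eq_start_add_half (s e : Int) (h : s ≤ e) :
    PySem.Int.floordiv (s + e) 2 = s + ((e - s).toNat / 2 : Nat) := by
  rw [PySem.Int.floordiv_eq_ediv_of_pos (by norm_num)]
  omega

-- A's while loop and B's (start, length) recursion perform the identical narrowing.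
theorem loop_eq_go (arr : List Int) (d : Nat) (s e : Int)
    (hle : s ≤ e) (hd : (e - s).toNat = d) :
    find_smallest_missing_loop arr s e = fsm_go arr s d := by
  induction d using Nat.strong_induction_on generalizing s e with
  | _ d ih =>
    rw [find_smallest_missing_loop, fsm_go]
    by_cases h : s < e
    · have hd0 : d ≠ 0 := by omega
      rw [dif_pos h, if_neg hd0]
      have hm := mid_eq_start_add_half s e hle
      simp only [hm, hd]
      split
      · exact ih (d - d / 2 - 1) (by omega) _ e (by omega) (by omega)
      · exact ih (d / 2) (by omega) s _ (by omega) (by omega)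
    · have hd0 : d = 0 := by omega
      rw [dif_neg h, if_pos hd0]
      omega

-- ===== VERDICT (by name: the statement is the Claim_ definition above) =====
theorem find_smallest_missing_spec : Claim_equal_find_smallest_missing := by
  intro arr _ hpre
  unfold Spec_find_smallest_missing find_smallest_missing find_smallest_missing_alt
  cases harr : PySem.List.pyGet? arr 0 with
  | none => rfl
  | some a0 =>
    have hlen : 1 ≤ arr.length := by
      cases arr with
      | nil => simp [PySem.List.pyGet?] at harr
      | cons x xs => simp
    simp only []
    split
    · rfl
    · split
      · rfl
      · exact loop_eq_go arr (arr.length - 1) 0 ((arr.length : Int) - 1) (by omega) (by omega)
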